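-- pv_equiv track=rewrite | github.com/LucaGoubelle/SmartSVWeb | src/smartSV/processDataSV2.py | searchIndex_Min_inColumn_inMatrix2D
-- ===== SOURCE A (Python) =====
-- def searchIndex_Min_inColumn_inMatrix2D(matrix2D, index_column):
--     elementMin = matrix2D[0][index_column]
--     indexRowMin = 0
--     n = len(matrix2D)
--     for i in range (1, n, +1):
--         if(matrix2D[i][index_column] < elementMin):
--             elementMin = matrix2D[i][index_column]
--             indexRowMin = i
--     return indexRowMin
-- ===== SOURCE B (Python) =====
-- def searchIndex_Min_inColumn_inMatrix2D(matrix2D, index_column):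
--     col = [row[index_column] for row in matrix2D]
--     return col.index(min(col))
-- ===== Notes on version B (the rewrite author's own statement) =====
-- stated objective: simpler
-- what changed: Replaces the fused running-min index loop with two passes: extract the column as a list, then return col.index(min(col)) (first occurrence matches A's strict-< first-wins tie-breaking).
import Mathlib
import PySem

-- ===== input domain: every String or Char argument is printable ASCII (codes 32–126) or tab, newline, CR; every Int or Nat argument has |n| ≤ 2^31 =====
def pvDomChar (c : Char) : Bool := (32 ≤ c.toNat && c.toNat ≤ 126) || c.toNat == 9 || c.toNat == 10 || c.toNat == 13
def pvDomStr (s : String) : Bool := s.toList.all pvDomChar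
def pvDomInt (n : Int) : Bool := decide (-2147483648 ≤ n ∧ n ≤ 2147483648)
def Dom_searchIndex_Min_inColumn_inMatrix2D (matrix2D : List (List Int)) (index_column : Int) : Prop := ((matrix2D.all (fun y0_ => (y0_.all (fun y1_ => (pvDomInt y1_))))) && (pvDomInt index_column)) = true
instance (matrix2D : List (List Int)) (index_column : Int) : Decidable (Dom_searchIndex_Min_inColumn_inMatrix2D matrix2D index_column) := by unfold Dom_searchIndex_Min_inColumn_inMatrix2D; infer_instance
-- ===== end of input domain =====

-- B replaces A's fused running-min index loop by two passes (extract the column, then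
-- col.index(min(col))); objective: simpler.

-- ===== PORT A =====
-- literal transliteration of A: running minimum and its row index over range(1, n)
def searchIndex_Min_inColumn_inMatrix2D (matrix2D : List (List Int)) (index_column : Int) : Int :=
  let elementMin : Int := PySem.List.pyGetD (PySem.List.pyGetD matrix2D 0 []) index_column 0
  let n : Int := matrix2D.length
  let st := (PySem.List.pyRange 1 n 1).foldl
    (fun (st : Int × Int) i =>
      if PySem.List.pyGetD (PySem.List.pyGetD matrix2D i []) index_column 0 < st.1 then
        (PySem.List.pyGetD (PySem.List.pyGetD matrix2D i []) index_column 0, i)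
      else st)
    (elementMin, 0)
  st.2

-- ===== PORT B =====
-- literal transliteration of B: col = [row[index_column] for row in matrix2D]; col.index(min(col))
def searchIndex_Min_inColumn_inMatrix2D_alt (matrix2D : List (List Int)) (index_column : Int) : Int :=
  let col : List Int := matrix2D.map (fun row => PySem.List.pyGetD row index_column 0)
  match PySem.List.min? col (fun x => x) with
  | none => 0
  | some mn => ((PySem.List.index? col mn).getD 0 : Nat)

-- ===== PRECONDITION & SPEC =====
-- Pre_ excludes exactly the inputs where Python A raises: the empty matrix (IndexError on
-- matrix2D[0]) and any row for which index_column is not a valid Python index (IndexError).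
def Pre_searchIndex_Min_inColumn_inMatrix2D (matrix2D : List (List Int)) (index_column : Int) : Prop :=
  matrix2D ≠ [] ∧ ∀ row ∈ matrix2D, -(row.length : Int) ≤ index_column ∧ index_column < (row.length : Int)
instance (matrix2D : List (List Int)) (index_column : Int) : Decidable (Pre_searchIndex_Min_inColumn_inMatrix2D matrix2D index_column) := by unfold Pre_searchIndex_Min_inColumn_inMatrix2D; infer_instance

def pvWitness_searchIndex_Min_inColumn_inMatrix2D : List (List Int) × Int := ([[3, 1], [2, 0], [5, 4]], 1)

def Spec_searchIndex_Min_inColumn_inMatrix2D (matrix2D : List (List Int)) (index_column : Int) (out : Int) : Prop := out = searchIndex_Min_inColumn_inMatrix2D_alt matrix2D index_column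
instance (matrix2D : List (List Int)) (index_column : Int) (out : Int) : Decidable (Spec_searchIndex_Min_inColumn_inMatrix2D matrix2D index_column out) := by unfold Spec_searchIndex_Min_inColumn_inMatrix2D; infer_instance

-- ===== CLAIM (what is proved, stated in full; the proofs are below) =====
def Claim_equal_searchIndex_Min_inColumn_inMatrix2D : Prop := ∀ (matrix2D : List (List Int)) (index_column : Int), Dom_searchIndex_Min_inColumn_inMatrix2D matrix2D index_column → Pre_searchIndex_Min_inColumn_inMatrix2D matrix2D index_column → Spec_searchIndex_Min_inColumn_inMatrix2D matrix2D index_column (searchIndex_Min_inColumn_inMatrix2D matrix2D index_column)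

-- ===== LEMMAS AND PROOFS =====

-- A's loop over a nonempty column list a :: t computes (the minimum, its first index).
theorem pv_loop_spec (a : Int) (t : List Int) :
    (PySem.List.pyRange 1 (((a :: t).length : Int)) 1).foldl
      (fun (st : Int × Int) i =>
        if PySem.List.pyGetD (a :: t) i 0 < st.1 then (PySem.List.pyGetD (a :: t) i 0, i) else st)
      (a, 0)
    = (t.foldl min a, (((PySem.List.index? (a :: t) (t.foldl min a)).getD 0 : Nat) : Int)) := by
  induction t using List.reverseRecOn with
  | nil =>
      simp [PySem.List.pyRange_one_eq_nil]
  | append_singleton t x ih =>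
      have hL : ((a :: (t ++ [x])).length : Int) = ((a :: t).length : Int) + 1 := by
        simp
      rw [hL, PySem.List.pyRange_one_succ_right (by simp : (1:Int) ≤ ((a :: t).length : Int))]
      rw [List.foldl_append]
      have hcongr :
          (PySem.List.pyRange 1 (((a :: t).length : Int)) 1).foldl
            (fun (st : Int × Int) i =>
              if PySem.List.pyGetD (a :: (t ++ [x])) i 0 < st.1 then (PySem.List.pyGetD (a :: (t ++ [x])) i 0, i) else st)
            (a, 0)
          = (PySem.List.pyRange 1 (((a :: t).length : Int)) 1).foldl
            (fun (st : Int × Int) i =>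
              if PySem.List.pyGetD (a :: t) i 0 < st.1 then (PySem.List.pyGetD (a :: t) i 0, i) else st)
            (a, 0) := by
        apply PySem.List.foldl_congr_mem
        intro acc i hi
        rw [PySem.List.mem_pyRange_one] at hi
        have h0 : (0:Int) ≤ i := by omega
        have h1 : i < ((a :: t).length : Int) := hi.2
        have h2 : i < ((a :: (t ++ [x])).length : Int) := by
          simp at h1 ⊢; omega
        rw [PySem.List.pyGetD_eq_getElem (a :: (t ++ [x])) 0 h0 h2,
            PySem.List.pyGetD_eq_getElem (a :: t) 0 h0 h1]
        have hlt : i.toNat < (a :: t).length := by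
          simp at h1 ⊢; omega
        have : (a :: (t ++ [x]))[i.toNat]'(by simp at h2 ⊢; omega) = (a :: t)[i.toNat]'hlt := by
          have : a :: (t ++ [x]) = (a :: t) ++ [x] := by simp
          rw [List.getElem_of_eq this, List.getElem_append_left hlt]
        rw [this]
      rw [hcongr, ih]
      -- the last iteration, index (a :: t).length, reads x
      have hx : PySem.List.pyGetD (a :: (t ++ [x])) (((a :: t).length : Int)) 0 = x := by
        rw [PySem.List.pyGetD_natCast]
        have : a :: (t ++ [x]) = (a :: t) ++ [x] := by simp
        rw [this]
        simp [List.getD]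
      set mn := t.foldl min a with hmn
      have hfold : (t ++ [x]).foldl min a = min mn x := by
        rw [List.foldl_append]; rfl
      by_cases hlt : x < mn
      · have hnotmem : x ∉ a :: t := by
          intro hmem
          have hle := PySem.List.foldl_min_le t a
          rcases List.mem_cons.mp hmem with h | h
          · subst h; exact absurd hlt (not_lt.mpr hle.1)
          · exact absurd hlt (not_lt.mpr (hle.2 x h))
        have hminx : min mn x = x := min_eq_right (le_of_lt hlt)
        simp only [List.foldl_cons, List.foldl_nil, hx, hfold, hminx, if_pos hlt]
        rw [← List.cons_append, PySem.List.index?_append_singleton_self (a :: t) x hnotmem]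
        simp
      · have hminx : min mn x = mn := min_eq_left (not_lt.mp hlt)
        have hmem : mn ∈ a :: t := by
          rcases PySem.List.foldl_min_mem t a with h | h
          · rw [hmn, h]; exact List.mem_cons_self
          · exact List.mem_cons_of_mem a h
        simp only [List.foldl_cons, List.foldl_nil, hx, hfold, hminx, if_neg hlt]
        rw [← List.cons_append, PySem.List.index?_append_of_mem [x] hmem]

-- ===== VERDICT (by name: the statement is the Claim_ definition above) =====
theorem searchIndex_Min_inColumn_inMatrix2D_spec : Claim_equal_searchIndex_Min_inColumn_inMatrix2D := by
  intro matrix2D index_column _hdom hpre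
  unfold Spec_searchIndex_Min_inColumn_inMatrix2D
  obtain ⟨hne, -⟩ := hpre
  obtain ⟨r, m', rfl⟩ := List.exists_cons_of_ne_nil hne
  unfold searchIndex_Min_inColumn_inMatrix2D searchIndex_Min_inColumn_inMatrix2D_alt
  set f : List Int → Int := fun row => PySem.List.pyGetD row index_column 0 with hf
  have hcol : (r :: m').map f = f r :: m'.map f := by simp
  -- A's loop over the matrix equals the same loop over the extracted column
  have hcongr :
      (PySem.List.pyRange 1 (((r :: m').length : Int)) 1).foldl
        (fun (st : Int × Int) i =>
          if PySem.List.pyGetD (PySem.List.pyGetD (r :: m') i []) index_column 0 < st.1 then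
            (PySem.List.pyGetD (PySem.List.pyGetD (r :: m') i []) index_column 0, i)
          else st)
        (PySem.List.pyGetD (PySem.List.pyGetD (r :: m') 0 []) index_column 0, 0)
      = (PySem.List.pyRange 1 (((f r :: m'.map f).length : Int)) 1).foldl
        (fun (st : Int × Int) i =>
          if PySem.List.pyGetD (f r :: m'.map f) i 0 < st.1 then
            (PySem.List.pyGetD (f r :: m'.map f) i 0, i)
          else st)
        (f r, 0) := by
    have hlen : ((f r :: m'.map f).length : Int) = ((r :: m').length : Int) := by simp
    rw [hlen, PySem.List.pyGetD_zero_cons]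
    apply PySem.List.foldl_congr_mem
    intro acc i hi
    rw [PySem.List.mem_pyRange_one] at hi
    have h0 : (0:Int) ≤ i := by omega
    have hlt : i.toNat < (r :: m').length := by
      have := hi.2; simp at this ⊢; omega
    have hmap : PySem.List.pyGetD (f r :: m'.map f) i 0 =
        PySem.List.pyGetD (PySem.List.pyGetD (r :: m') i []) index_column 0 := by
      rw [PySem.List.pyGetD_eq_getElem (r :: m') [] h0 hi.2,
          PySem.List.pyGetD_eq_getElem (f r :: m'.map f) 0 h0 (by simpa using hi.2)]
      have hg : ((r :: m').map f)[i.toNat]'(by simpa using hlt) = f ((r :: m')[i.toNat]'hlt) :=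
        List.getElem_map f
      simpa using hg
    rw [hmap]
  simp only [hcongr]
  rw [pv_loop_spec (f r) (m'.map f)]
  rw [hcol, PySem.List.min?_id_cons]
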